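-- pv_equiv track=rewrite | github.com/zilin0627/zstAgent | rag/ingest_compare.py | _count_repeated_short_lines
-- ===== SOURCE A (Python) =====
-- def _count_repeated_short_lines(raw_pages: list[str], min_repeat: int = 3) -> int:
--     counter: dict[str, int] = {}
--     for page in raw_pages:
--         for line in page.splitlines():
--             stripped = line.strip()
--             if stripped and len(stripped) <= 30:
--                 counter[stripped] = counter.get(stripped, 0) + 1
--     return sum(1 for _, repeat in counter.items() if repeat >= min_repeat)
-- ===== SOURCE B (Python) =====
-- def _count_repeated_short_lines(raw_pages: list[str], min_repeat: int = 3) -> int: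
--     lines = []
--     for page in raw_pages:
--         for line in page.splitlines():
--             s = line.strip()
--             if s and len(s) <= 30:
--                 lines.append(s)
--     lines.sort()
--     total = 0
--     i = 0
--     n = len(lines)
--     while i < n:
--         j = i + 1
--         while j < n and lines[j] == lines[i]:
--             j += 1
--         if j - i >= min_repeat:
--             total += 1
--         i = j
--     return total
-- ===== Notes on version B (the rewrite author's own statement) =====
-- stated objective: alternative
-- what changed: Replaces the dict-of-counts (hash counting, then scanning items) by gathering the qualifying stripped lines into a list, sorting it, and counting maximal runs of equal adjacent lines whose length is >= min_repeat with a two-index scan.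
import Mathlib
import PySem

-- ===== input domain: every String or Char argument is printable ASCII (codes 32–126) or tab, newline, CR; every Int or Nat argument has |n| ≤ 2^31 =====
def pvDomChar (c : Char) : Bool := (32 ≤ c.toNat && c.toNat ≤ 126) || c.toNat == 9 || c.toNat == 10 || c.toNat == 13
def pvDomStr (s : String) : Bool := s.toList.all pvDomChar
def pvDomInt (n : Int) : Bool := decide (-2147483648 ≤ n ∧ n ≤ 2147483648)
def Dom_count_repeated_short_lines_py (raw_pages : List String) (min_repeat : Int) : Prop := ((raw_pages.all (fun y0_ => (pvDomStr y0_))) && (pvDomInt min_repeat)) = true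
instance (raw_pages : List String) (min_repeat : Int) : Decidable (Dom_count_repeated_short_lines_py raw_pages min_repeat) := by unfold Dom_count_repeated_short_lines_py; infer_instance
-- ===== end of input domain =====

-- B replaces A's hash-count dict by gathering the qualifying stripped lines, sorting them, and
-- counting runs of equal adjacent lines of length ≥ min_repeat (alternative decomposition, same result).

-- ===== PORT A =====
-- literal port of A: dict counter built line by line, then count entries with repeat ≥ min_repeat
def count_repeated_short_lines_py (raw_pages : List String) (min_repeat : Int) : Int :=
  let counter : PySem.Dict String Int :=
    raw_pages.foldl (fun d page =>
      (PySem.Str.splitlines page).foldl (fun d line =>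
        let stripped := PySem.Str.strip line
        if stripped ≠ "" ∧ PySem.Str.len stripped ≤ 30 then
          d.insert stripped (d.getD stripped 0 + 1)
        else d) d) PySem.Dict.empty
  ((counter.items.countP (fun p => min_repeat ≤ p.2)) : Int)

-- ===== PORT B =====
-- B's run-length scan over the sorted list: outer while over i, inner while advancing j over the run
def pvRunScan (min_repeat : Int) : List String → Int
  | [] => 0
  | x :: rest =>
      (if min_repeat ≤ 1 + ((rest.takeWhile (fun y => y == x)).length : Int) then 1 else 0)
      + pvRunScan min_repeat (rest.dropWhile (fun y => y == x))
termination_by l => l.length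
decreasing_by
  exact Nat.lt_succ_of_le (List.length_dropWhile_le _ _)

def count_repeated_short_lines_py_alt (raw_pages : List String) (min_repeat : Int) : Int :=
  let lines : List String :=
    raw_pages.foldl (fun acc page =>
      (PySem.Str.splitlines page).foldl (fun acc line =>
        let s := PySem.Str.strip line
        if s ≠ "" ∧ PySem.Str.len s ≤ 30 then acc ++ [s] else acc) acc) []
  pvRunScan min_repeat (PySem.List.sorted lines (fun x => x) false)

-- ===== PRECONDITION & SPEC =====
def Spec_count_repeated_short_lines_py (raw_pages : List String) (min_repeat : Int) (out : Int) : Prop := out = count_repeated_short_lines_py_alt raw_pages min_repeat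
instance (raw_pages : List String) (min_repeat : Int) (out : Int) : Decidable (Spec_count_repeated_short_lines_py raw_pages min_repeat out) := by unfold Spec_count_repeated_short_lines_py; infer_instance

-- ===== CLAIM (what is proved, stated in full; the proofs are below) =====
def Claim_equal_count_repeated_short_lines_py : Prop := ∀ (raw_pages : List String) (min_repeat : Int), Dom_count_repeated_short_lines_py raw_pages min_repeat → Spec_count_repeated_short_lines_py raw_pages min_repeat (count_repeated_short_lines_py raw_pages min_repeat)

-- ===== LEMMAS AND PROOFS =====

-- the common filter: strip the line, keep it iff non-empty and length ≤ 30
def pvQual (line : String) : Option String :=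
  let s := PySem.Str.strip line
  if s ≠ "" ∧ PySem.Str.len s ≤ 30 then some s else none

-- the multiset of qualifying lines, as a flat list
def pvL (raw_pages : List String) : List String :=
  (raw_pages.flatMap PySem.Str.splitlines).filterMap pvQual

lemma pv_foldl_nested {α β δ : Type} (f : α → List β) (step : δ → β → δ) :
    ∀ (ps : List α) (d : δ),
      ps.foldl (fun d p => (f p).foldl step d) d = (ps.flatMap f).foldl step d := by
  intro ps
  induction ps with
  | nil => intro d; simp
  | cons p ps ih => intro d; simp [List.flatMap_cons, List.foldl_append, ih]

-- A's dict-building loop over a list of lines, rephrased over the filtered lines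
lemma pv_counter_fold :
    ∀ (l : List String) (d : PySem.Dict String Int),
      l.foldl (fun d line =>
        let stripped := PySem.Str.strip line
        if stripped ≠ "" ∧ PySem.Str.len stripped ≤ 30 then
          d.insert stripped (d.getD stripped 0 + 1)
        else d) d
      = (l.filterMap pvQual).foldl (fun d x => d.insert x (d.getD x 0 + 1)) d := by
  intro l
  induction l with
  | nil => intro d; rfl
  | cons b l ih =>
    intro d
    by_cases h : PySem.Str.strip b ≠ "" ∧ PySem.Str.len (PySem.Str.strip b) ≤ 30
    · have hq : pvQual b = some (PySem.Str.strip b) := by unfold pvQual; rw [if_pos h]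
      simp only [List.foldl_cons, List.filterMap_cons, hq]
      rw [if_pos h]
      exact ih _
    · have hq : pvQual b = none := by unfold pvQual; rw [if_neg h]
      simp only [List.foldl_cons, List.filterMap_cons, hq]
      rw [if_neg h]
      exact ih _

-- B's list-building loop over a list of lines, rephrased over the filtered lines
lemma pv_append_fold :
    ∀ (l : List String) (acc : List String),
      l.foldl (fun acc line =>
        let s := PySem.Str.strip line
        if s ≠ "" ∧ PySem.Str.len s ≤ 30 then acc ++ [s] else acc) acc
      = acc ++ l.filterMap pvQual := by
  intro l
  induction l with
  | nil => intro acc; simp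
  | cons b l ih =>
    intro acc
    by_cases h : PySem.Str.strip b ≠ "" ∧ PySem.Str.len (PySem.Str.strip b) ≤ 30
    · have hq : pvQual b = some (PySem.Str.strip b) := by unfold pvQual; rw [if_pos h]
      simp only [List.foldl_cons, List.filterMap_cons, hq]
      rw [if_pos h, ih]
      simp
    · have hq : pvQual b = none := by unfold pvQual; rw [if_neg h]
      simp only [List.foldl_cons, List.filterMap_cons, hq]
      rw [if_neg h, ih]

-- a nodup list with the same members as L counts its qualifying elements as a filtered toFinset card
lemma pv_countP_nodup {s L : List String} (hn : s.Nodup) (hm : ∀ x, x ∈ s ↔ x ∈ L)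
    (m : Int) (c : String → Nat) :
    s.countP (fun k => decide (m ≤ ((c k : Nat) : Int)))
      = (L.toFinset.filter (fun k => m ≤ ((c k : Nat) : Int))).card := by
  have h1 : s.toFinset = L.toFinset := by
    ext x; simp [List.mem_toFinset, hm x]
  calc s.countP (fun k => decide (m ≤ ((c k : Nat) : Int)))
      = (s.filter (fun k => decide (m ≤ ((c k : Nat) : Int)))).length :=
        List.countP_eq_length_filter
    _ = (s.filter (fun k => decide (m ≤ ((c k : Nat) : Int)))).toFinset.card :=
        (List.toFinset_card_of_nodup (hn.filter _)).symm
    _ = (s.toFinset.filter (fun k => m ≤ ((c k : Nat) : Int))).card := by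
        rw [List.toFinset_filter]
        congr 1
        apply Finset.filter_congr
        intro k _
        simp
    _ = (L.toFinset.filter (fun k => m ≤ ((c k : Nat) : Int))).card := by rw [h1]

-- A computes the number of distinct qualifying lines with count ≥ min_repeat
lemma pv_A_eq (raw_pages : List String) (m : Int) :
    count_repeated_short_lines_py raw_pages m
      = (((pvL raw_pages).toFinset.filter
          (fun k => m ≤ ((List.count k (pvL raw_pages) : Nat) : Int))).card : Int) := by
  unfold count_repeated_short_lines_py
  rw [pv_foldl_nested, pv_counter_fold, ← pvL,
      PySem.Dict.foldl_insert_getD_add_one_eq_counter]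
  simp only [PySem.Dict.items_counter, List.countP_map, Function.comp_def]
  rw [pv_countP_nodup (PySem.Set.nodup_ofList (pvL raw_pages))
      (fun x => PySem.Set.mem_ofList _ x) m (fun k => List.count k (pvL raw_pages))]

-- the run-length scan of a sorted list counts distinct elements with count ≥ m
lemma pv_runScan_eq (m : Int) :
    ∀ (M : List String), M.Pairwise (· ≤ ·) →
      pvRunScan m M
        = ((M.toFinset.filter (fun k => m ≤ ((List.count k M : Nat) : Int))).card : Int) := by
  intro M
  induction M using pvRunScan.induct with
  | case1 => simp [pvRunScan]
  | case2 x rest ih =>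
    intro hp
    have hx_all : ∀ y ∈ rest, x ≤ y := (List.pairwise_cons.mp hp).1
    have hrest : rest.Pairwise (· ≤ ·) := (List.pairwise_cons.mp hp).2
    set t := rest.takeWhile (fun y => y == x) with ht
    set d := rest.dropWhile (fun y => y == x) with hd
    have hsplit : t ++ d = rest := List.takeWhile_append_dropWhile
    have ht_all : ∀ y ∈ t, y = x := by
      intro y hy
      rw [ht] at hy
      have hb := List.mem_takeWhile_imp hy
      exact eq_of_beq (by simpa using hb)
    have hd_pw : d.Pairwise (· ≤ ·) := by
      rw [← hsplit] at hrest
      exact (List.pairwise_append.mp hrest).2.1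
    have hxd : x ∉ d := by
      intro hx
      cases hdc : d with
      | nil => rw [hdc] at hx; simp at hx
      | cons h d' =>
        have hh_ne : ¬ (h == x) = true := by
          have h0 := List.head?_dropWhile_not (fun y => y == x) rest
          rw [← hd, hdc] at h0
          simpa using h0
        have hh_ne' : h ≠ x := fun he => hh_ne (by simp [he])
        have hh_mem : h ∈ rest := by
          rw [← hsplit, hdc]; simp
        have hxh : x < h := lt_of_le_of_ne (hx_all h hh_mem) (Ne.symm hh_ne')
        rw [hdc] at hx
        rcases List.mem_cons.mp hx with he | hmem
        · exact hh_ne' he.symm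
        · have hhx : h ≤ x := by
            rw [hdc] at hd_pw
            exact (List.pairwise_cons.mp hd_pw).1 x hmem
          exact absurd (lt_of_lt_of_le hxh hhx) (lt_irrefl x)
    have hcount_t : ∀ k, k ≠ x → List.count k t = 0 := by
      intro k hk
      exact List.count_eq_zero.mpr (fun hmem => hk (ht_all k hmem))
    have hcount_x_t : List.count x t = t.length := by
      rw [List.count_eq_length]
      intro b hb; exact (ht_all b hb).symm
    have hcount_x : List.count x (x :: rest) = t.length + 1 := by
      rw [← hsplit, List.count_cons_self, List.count_append, hcount_x_t,
          List.count_eq_zero.mpr hxd]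
    have hcount_k : ∀ k, k ≠ x → List.count k (x :: rest) = List.count k d := by
      intro k hk
      rw [← hsplit, List.count_cons_of_ne (Ne.symm hk), List.count_append,
          hcount_t k hk, Nat.zero_add]
    have hfin : (x :: rest).toFinset = insert x d.toFinset := by
      ext y
      simp only [List.mem_toFinset, List.mem_cons, Finset.mem_insert, ← hsplit,
        List.mem_append]
      constructor
      · rintro (h | h | h)
        · exact Or.inl h
        · exact Or.inl (ht_all y h)
        · exact Or.inr (by simpa using h)
      · rintro (h | h)
        · exact Or.inl h
        · exact Or.inr (Or.inr (by simpa using h))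
    have hxd_fin : x ∉ d.toFinset := by simpa using hxd
    have hfilter_d :
        d.toFinset.filter (fun k => m ≤ ((List.count k (x :: rest) : Nat) : Int))
          = d.toFinset.filter (fun k => m ≤ ((List.count k d : Nat) : Int)) := by
      apply Finset.filter_congr
      intro k hk
      have hk_ne : k ≠ x := fun he => hxd_fin (he ▸ hk)
      rw [hcount_k k hk_ne]
    rw [hfin, Finset.filter_insert]
    have hih := ih hd_pw
    by_cases hcase : m ≤ 1 + (t.length : Int)
    · have hpx : m ≤ ((List.count x (x :: rest) : Nat) : Int) := by
        rw [hcount_x]; push_cast; omega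
      rw [if_pos hpx,
          Finset.card_insert_of_notMem (fun hmem => hxd_fin (Finset.mem_filter.mp hmem).1),
          hfilter_d]
      simp only [pvRunScan]
      rw [← ht, ← hd, if_pos hcase, hih]
      push_cast; ring
    · have hpx : ¬ m ≤ ((List.count x (x :: rest) : Nat) : Int) := by
        rw [hcount_x]; push_cast at hcase ⊢; omega
      rw [if_neg hpx, hfilter_d]
      simp only [pvRunScan]
      rw [← ht, ← hd, if_neg hcase, hih]
      ring

-- B computes the same quantity
lemma pv_B_eq (raw_pages : List String) (m : Int) :
    count_repeated_short_lines_py_alt raw_pages m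
      = (((pvL raw_pages).toFinset.filter
          (fun k => m ≤ ((List.count k (pvL raw_pages) : Nat) : Int))).card : Int) := by
  unfold count_repeated_short_lines_py_alt
  rw [pv_foldl_nested, pv_append_fold, List.nil_append, ← pvL]
  have hperm : (PySem.List.sorted (pvL raw_pages) (fun x => x) false).Perm (pvL raw_pages) :=
    PySem.List.sorted_perm _ _ _
  have hpw : (PySem.List.sorted (pvL raw_pages) (fun x => x) false).Pairwise (· ≤ ·) :=
    PySem.List.sorted_pairwise (pvL raw_pages) (fun x => x)
  rw [pv_runScan_eq m _ hpw,
      List.toFinset_eq_of_perm _ _ hperm]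
  simp only [fun k => hperm.count_eq k]

-- ===== VERDICT (by name: the statement is the Claim_ definition above) =====
theorem count_repeated_short_lines_py_spec : Claim_equal_count_repeated_short_lines_py := by
  intro raw_pages min_repeat _
  unfold Spec_count_repeated_short_lines_py
  rw [pv_A_eq, pv_B_eq]
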